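-- pv_equiv track=rewrite | github.com/Ayrton3712/sheldon-prime-generalization | sheldon_prime_b.py | multiply_digits_in_base
-- ===== SOURCE A (Python) =====
-- def get_digits_in_base(r, b):
--     """Get the list of digits of r in base b."""
--     if r == 0:
--         return [0]
--     digits = []
--     while r > 0:
--         digits.append(r % b)
--         r //= b
--     return digits[::-1]
--
-- def multiply_digits_in_base(r, b):
--     """Return the product of the digits of r in base b.
--
--     Short-circuits to 0 if any digit is 0 (matching never equal any valid n >= 1).
--     """
--     digits = get_digits_in_base(r, b)
--     product = 1
--     for digit in digits:
--         if digit == 0: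
--             return 0
--         product *= digit
--     return product
-- ===== SOURCE B (Python) =====
-- def multiply_digits_in_base(r, b):
--     """Return the product of the digits of r in base b (0 if any digit is 0)."""
--     if r == 0:
--         return 0
--     product = 1
--     while r > 0:
--         digit = r % b
--         if digit == 0:
--             return 0
--         product *= digit
--         r //= b
--     return product
-- ===== Notes on version B (the rewrite author's own statement) =====
-- stated objective: simpler
-- what changed: Single fused while-loop that multiplies each digit as it is extracted (short-circuiting on a zero digit), instead of building a digit list, reversing it, and scanning it in a second pass; no helper, no intermediate list.
import Mathlib
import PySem

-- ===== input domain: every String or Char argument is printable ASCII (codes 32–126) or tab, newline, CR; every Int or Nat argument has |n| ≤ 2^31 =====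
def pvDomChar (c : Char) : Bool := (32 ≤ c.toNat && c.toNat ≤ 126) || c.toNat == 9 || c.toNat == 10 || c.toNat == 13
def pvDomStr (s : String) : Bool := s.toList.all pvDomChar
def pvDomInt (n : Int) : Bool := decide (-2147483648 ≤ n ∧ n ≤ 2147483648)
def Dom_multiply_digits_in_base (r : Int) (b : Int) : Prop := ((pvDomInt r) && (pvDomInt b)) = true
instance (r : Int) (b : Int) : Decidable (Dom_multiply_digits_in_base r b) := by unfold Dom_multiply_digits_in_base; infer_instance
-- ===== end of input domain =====

-- B fuses A's build-list/reverse/scan into one digit-extraction loop (objective: simpler).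

-- ===== PORT A =====
-- while r > 0: digits.append(r % b); r //= b   (fuel r.toNat is enough on Pre_: b ≥ 2 halves r each step, b < 0 stops after one step)
def pvDigitsLoop (fuel : Nat) (r b : Int) (digits : List Int) : List Int :=
  match fuel with
  | 0 => digits
  | fuel + 1 =>
    if r > 0 then pvDigitsLoop fuel (PySem.Int.floordiv r b) b (digits ++ [PySem.Int.mod r b])
    else digits

def get_digits_in_base (r b : Int) : List Int :=
  if r = 0 then [0] else (pvDigitsLoop r.toNat r b []).reverse  -- digits[::-1]

-- for digit in digits: if digit == 0: return 0; product *= digit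
def pvProdLoop (ds : List Int) (product : Int) : Int :=
  match ds with
  | [] => product
  | d :: ds => if d = 0 then 0 else pvProdLoop ds (product * d)

def multiply_digits_in_base (r : Int) (b : Int) : Int :=
  pvProdLoop (get_digits_in_base r b) 1

-- ===== PORT B =====
-- single loop: digit = r % b; return 0 if digit == 0; product *= digit; r //= b
def pvAltLoop (fuel : Nat) (r b product : Int) : Int :=
  match fuel with
  | 0 => product
  | fuel + 1 =>
    if r > 0 then
      let digit := PySem.Int.mod r b
      if digit = 0 then 0 else pvAltLoop fuel (PySem.Int.floordiv r b) b (product * digit)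
    else product

def multiply_digits_in_base_alt (r : Int) (b : Int) : Int :=
  if r = 0 then 0 else pvAltLoop r.toNat r b 1

-- ===== PRECONDITION & SPEC =====
-- Pre_ excludes exactly the inputs where A never returns: b = 0 (ZeroDivisionError) and
-- b = 1 with r > 0 (the while loop never terminates, since r //= 1 leaves r unchanged).
def Pre_multiply_digits_in_base (r : Int) (b : Int) : Prop := b ≠ 0 ∧ ¬(b = 1 ∧ r > 0)
instance (r : Int) (b : Int) : Decidable (Pre_multiply_digits_in_base r b) := by unfold Pre_multiply_digits_in_base; infer_instance
def pvWitness_multiply_digits_in_base : Int × Int := (12, 10)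

def Spec_multiply_digits_in_base (r : Int) (b : Int) (out : Int) : Prop := out = multiply_digits_in_base_alt r b
instance (r : Int) (b : Int) (out : Int) : Decidable (Spec_multiply_digits_in_base r b out) := by unfold Spec_multiply_digits_in_base; infer_instance

-- ===== CLAIM (what is proved, stated in full; the proofs are below) =====
def Claim_equal_multiply_digits_in_base : Prop := ∀ (r : Int) (b : Int), Dom_multiply_digits_in_base r b → Pre_multiply_digits_in_base r b → Spec_multiply_digits_in_base r b (multiply_digits_in_base r b)

-- ===== LEMMAS AND PROOFS =====

-- pvProdLoop computed in closed form: 0 if some digit is 0, else product of all digits times the accumulator.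
theorem pvProdLoop_eq (ds : List Int) (p : Int) :
    pvProdLoop ds p = if (0 : Int) ∈ ds then 0 else p * ds.prod := by
  induction ds generalizing p with
  | nil => simp [pvProdLoop]
  | cons d ds ih =>
    simp only [pvProdLoop, List.mem_cons, List.prod_cons]
    by_cases h : d = 0
    · simp [h]
    · have h0 : ¬ ((0 : Int) = d) := fun e => h e.symm
      simp only [if_neg h, ih, h0, false_or]
      by_cases hz : (0 : Int) ∈ ds <;> simp [hz, mul_assoc]

-- the accumulator of pvDigitsLoop factors out
theorem pvDigitsLoop_acc (fuel : Nat) (r b : Int) (acc : List Int) :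
    pvDigitsLoop fuel r b acc = acc ++ pvDigitsLoop fuel r b [] := by
  induction fuel generalizing r acc with
  | zero => simp [pvDigitsLoop]
  | succ fuel ih =>
    by_cases h : r > 0
    · simp only [pvDigitsLoop, if_pos h, List.nil_append]
      rw [ih (acc := acc ++ [PySem.Int.mod r b]), ih (acc := [PySem.Int.mod r b]),
        List.append_assoc]
    · simp [pvDigitsLoop, h]

-- B's fused loop equals A's two passes (on the unreversed digit list), for any fuel
theorem pvAltLoop_eq (fuel : Nat) (r b p : Int) :
    pvAltLoop fuel r b p = pvProdLoop (pvDigitsLoop fuel r b []) p := by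
  induction fuel generalizing r p with
  | zero => simp [pvAltLoop, pvDigitsLoop, pvProdLoop]
  | succ fuel ih =>
    by_cases h : r > 0
    · simp only [pvAltLoop, pvDigitsLoop, if_pos h]
      rw [pvDigitsLoop_acc, List.nil_append, List.singleton_append, pvProdLoop]
      by_cases hz : PySem.Int.mod r b = 0
      · simp [hz]
      · simp [hz, ih]
    · simp only [pvAltLoop, pvDigitsLoop, if_neg h]
      rfl

-- the digit order is irrelevant to the short-circuiting product
theorem pvProdLoop_reverse (ds : List Int) (p : Int) :
    pvProdLoop ds.reverse p = pvProdLoop ds p := by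
  simp [pvProdLoop_eq, List.prod_reverse]

-- ===== VERDICT (by name: the statement is the Claim_ definition above) =====
theorem multiply_digits_in_base_spec : Claim_equal_multiply_digits_in_base := by
  intro r b _ _
  unfold Spec_multiply_digits_in_base multiply_digits_in_base multiply_digits_in_base_alt get_digits_in_base
  by_cases h : r = 0
  · simp [h, pvProdLoop]
  · rw [if_neg h, if_neg h, pvProdLoop_reverse, pvAltLoop_eq]
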